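-- pv_equiv track=rewrite | github.com/invictustitan2/aperion-event-bus | src/aperion_event_bus/metrics.py | _extract_tag
-- ===== SOURCE A (Python) =====
-- def _extract_tag(key: str, tag_name: str) -> str | None:
--     """Extract a tag value from a metric key."""
--     # Keys look like: prefix_metric{tag1=val1,tag2=val2}
--     if "{" not in key:
--         return None
--     tag_part = key.split("{", 1)[1].rstrip("}")
--     for pair in tag_part.split(","):
--         if "=" in pair:
--             name, value = pair.split("=", 1)
--             if name == tag_name:
--                 return value
--     return None
-- ===== SOURCE B (Python) =====
-- def _extract_tag(key: str, tag_name: str) -> str | None: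
--     """Extract a tag value from a metric key."""
--     # Substring search instead of pair iteration: a pair whose name is exactly
--     # tag_name appears in the tag section precisely as ",tag_name=" right after
--     # a comma (we prepend one comma so the first pair needs no special case).
--     if "{" not in key:
--         return None
--     if "=" in tag_name or "," in tag_name:
--         # a pair's name (text before its first "=", within one comma field)
--         # can never contain "=" or ",", so no pair can match
--         return None
--     tag_part = key.split("{", 1)[1].rstrip("}")
--     parts = ("," + tag_part).split("," + tag_name + "=", 1)
--     if len(parts) == 1:
--         return None
--     return parts[1].split(",", 1)[0]
-- ===== Notes on version B (the rewrite author's own statement) =====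
-- stated objective: alternative
-- what changed: B replaces A's loop over the comma-separated pairs (splitting each on '=' and comparing names) with a single substring search: it splits the comma-prefixed tag section once on the literal ",tag_name=" and returns what follows up to the next comma, after short-circuiting tag names that contain '=' or ',' (which can never equal a pair's name).
import Mathlib
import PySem

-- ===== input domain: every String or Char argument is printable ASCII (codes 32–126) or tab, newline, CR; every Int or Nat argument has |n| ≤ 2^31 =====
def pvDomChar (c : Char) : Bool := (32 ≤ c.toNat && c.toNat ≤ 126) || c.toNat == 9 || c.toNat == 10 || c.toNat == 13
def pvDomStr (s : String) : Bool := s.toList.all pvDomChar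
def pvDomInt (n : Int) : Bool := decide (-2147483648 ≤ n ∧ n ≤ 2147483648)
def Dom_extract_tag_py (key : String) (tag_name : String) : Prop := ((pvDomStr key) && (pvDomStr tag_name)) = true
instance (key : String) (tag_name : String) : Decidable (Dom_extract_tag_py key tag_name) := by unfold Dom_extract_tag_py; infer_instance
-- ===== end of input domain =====

-- B is an alternative of the same cost: instead of iterating over the comma-separated
-- pairs, it searches the (comma-prefixed) tag section once for the substring
-- ",tag_name=" and returns what follows up to the next comma.  Return value only.

-- hand port of Python's s.rstrip("}") (drop the maximal run of trailing '}'); exact for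
-- all strings; PySem has no one-sided stripChars, so this is ported by hand
def pvRstripBrace (cs : List Char) : List Char := (cs.reverse.dropWhile (fun c => c == '}')).reverse

-- ===== PORT A =====
-- A's for-loop over the comma-separated pairs with its early return
def pvLoopA : List (List Char) → List Char → Option (List Char)
  | [], _ => none
  | p :: rest, t =>
    if PySem.Chars.isIn ['='] p then
      -- name, value = pair.split("=", 1): exactly two parts since "=" in pair
      let parts := PySem.Chars.splitOnMax p ['='] 1
      if parts.getD 0 [] = t then some (parts.getD 1 []) else pvLoopA rest t
    else pvLoopA rest t

def extract_tag_py (key : String) (tag_name : String) : Option String :=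
  if PySem.Str.isIn "{" key then
    -- key.split("{", 1)[1]: index 1 exists since "{" in key
    let tag_part := pvRstripBrace ((PySem.Chars.splitOnMax key.toList ['{'] 1).getD 1 [])
    (pvLoopA (PySem.Chars.splitOn tag_part [',']) tag_name.toList).map String.ofList
  else none

-- ===== PORT B =====
def extract_tag_py_alt (key : String) (tag_name : String) : Option String :=
  if PySem.Str.isIn "{" key then
    if PySem.Str.isIn "=" tag_name || PySem.Str.isIn "," tag_name then none
    else
      let tag_part := pvRstripBrace ((PySem.Chars.splitOnMax key.toList ['{'] 1).getD 1 [])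
      -- parts = ("," + tag_part).split("," + tag_name + "=", 1)
      let parts := PySem.Chars.splitOnMax (',' :: tag_part) (',' :: tag_name.toList ++ ['=']) 1
      if parts.length = 1 then none
      -- parts[1].split(",", 1)[0]
      else some (String.ofList ((PySem.Chars.splitOnMax (parts.getD 1 []) [','] 1).getD 0 []))
  else none

-- ===== PRECONDITION & SPEC =====
def Spec_extract_tag_py (key : String) (tag_name : String) (out : Option String) : Prop := out = extract_tag_py_alt key tag_name
instance (key : String) (tag_name : String) (out : Option String) : Decidable (Spec_extract_tag_py key tag_name out) := by unfold Spec_extract_tag_py; infer_instance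

-- ===== CLAIM (what is proved, stated in full; the proofs are below) =====
def Claim_equal_extract_tag_py : Prop := ∀ (key : String) (tag_name : String), Dom_extract_tag_py key tag_name → Spec_extract_tag_py key tag_name (extract_tag_py key tag_name)

-- ===== LEMMAS AND PROOFS =====

def split1 (sep : List Char) : List Char → Option (List Char × List Char)
  | [] => if sep.isPrefixOf ([] : List Char) then some ([], []) else none
  | c :: rest =>
    if sep.isPrefixOf (c :: rest) then some ([], (c :: rest).drop sep.length)
    else (split1 sep rest).map (fun pr => (c :: pr.1, pr.2))

lemma go_zero (sep : List Char) : ∀ (fuel : Nat) (l cur : List Char) (acc : List (List Char)),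
    PySem.Chars.splitOnMax.go sep fuel 0 l cur acc = acc.reverse ++ [cur.reverse ++ l] := by
  intro fuel l cur acc
  cases fuel with
  | zero => simp [PySem.Chars.splitOnMax.go]
  | succ n => cases l with
    | nil => simp [PySem.Chars.splitOnMax.go]
    | cons c rest => simp [PySem.Chars.splitOnMax.go]

lemma go_one (sep : List Char) (hsep : sep ≠ []) : ∀ (fuel : Nat) (l : List Char), l.length < fuel →
    ∀ (cur : List Char) (acc : List (List Char)),
    PySem.Chars.splitOnMax.go sep fuel 1 l cur acc =
      acc.reverse ++ (match split1 sep l with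
        | none => [cur.reverse ++ l]
        | some (b, a) => [cur.reverse ++ b, a]) := by
  intro fuel
  induction fuel with
  | zero => intro l h; exact absurd h (by omega)
  | succ n ih =>
    intro l h cur acc
    cases l with
    | nil =>
      simp only [PySem.Chars.splitOnMax.go, split1]
      rw [if_neg (by simp [List.isPrefixOf_iff_prefix, hsep])]
      simp
    | cons c rest =>
      by_cases hp : sep.isPrefixOf (c :: rest)
      · simp only [PySem.Chars.splitOnMax.go, split1, hp, if_pos, if_neg (by omega : ¬ (1:Nat) = 0)]
        rw [go_zero]
        simp
      · simp only [PySem.Chars.splitOnMax.go, split1, hp, if_neg (by omega : ¬ (1:Nat) = 0)]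
        simp only [Bool.false_eq_true, if_false]
        rw [ih rest (by simp at h; omega) (c :: cur) acc]
        cases hs : split1 sep rest with
        | none => simp
        | some pr => cases pr; simp

lemma splitOnMax_one (sep l : List Char) (hsep : sep ≠ []) :
    PySem.Chars.splitOnMax l sep 1 =
      match split1 sep l with
      | none => [l]
      | some (b, a) => [b, a] := by
  unfold PySem.Chars.splitOnMax
  rw [if_neg (by omega)]
  rw [show ((1:Int).toNat) = 1 from rfl]
  rw [go_one sep hsep (l.length + 1) l (by omega) [] []]
  cases hs : split1 sep l with
  | none => simp
  | some pr => cases pr; simp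

lemma go_on (fuel : Nat) : ∀ (l : List Char), l.length < fuel → ∀ (cur : List Char) (acc : List (List Char)),
    PySem.Chars.splitOn.go [','] fuel l cur acc =
      acc.reverse ++ List.modifyHead (cur.reverse ++ ·) (List.splitOnP (· == ',') l) := by
  induction fuel with
  | zero => intro l h; exact absurd h (by omega)
  | succ n ih =>
    intro l h cur acc
    cases l with
    | nil => simp [PySem.Chars.splitOn.go]
    | cons c rest =>
      by_cases hc : c = ','
      · subst hc
        simp only [PySem.Chars.splitOn.go]
        rw [if_pos (by simp [List.isPrefixOf_iff_prefix])]
        rw [show List.drop ([','] : List Char).length (',' :: rest) = rest from rfl]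
        rw [ih rest (by simp at h; omega) [] (cur.reverse :: acc)]
        rw [List.splitOnP_cons, if_pos (by decide : ((',' : Char) == ',') = true)]
        cases hs : List.splitOnP (· == ',') rest with
        | nil => exact absurd hs (List.splitOnP_ne_nil _ _)
        | cons hd tl => simp
      · simp only [PySem.Chars.splitOn.go]
        rw [if_neg (by simp [List.isPrefixOf_iff_prefix]; exact fun hh => absurd hh.symm hc)]
        rw [ih rest (by simp at h; omega) (c :: cur) acc]
        simp only [List.splitOnP_cons]
        cases hs : List.splitOnP (· == ',') rest with
        | nil => exact absurd hs (List.splitOnP_ne_nil _ _)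
        | cons hd tl => simp [hc]

lemma splitOn_comma (s : List Char) :
    PySem.Chars.splitOn s [','] = List.splitOnP (· == ',') s := by
  unfold PySem.Chars.splitOn
  rw [go_on (s.length + 1) s (by omega) [] []]
  cases hs : List.splitOnP (· == ',') s with
  | nil => exact absurd hs (List.splitOnP_ne_nil _ _)
  | cons hd tl => simp

def joinC : List (List Char) → List Char
  | [] => []
  | [p] => p
  | p :: q :: P => p ++ ',' :: joinC (q :: P)

lemma splitOnP_noComma (s : List Char) : ∀ p ∈ List.splitOnP (· == ',') s, ',' ∉ p := by
  induction s with
  | nil => intro p hp; simp at hp; simp [hp]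
  | cons c rest ih =>
    intro p hp
    rw [List.splitOnP_cons] at hp
    by_cases hc : c = ','
    · rw [if_pos (by simp [hc])] at hp
      rcases List.mem_cons.mp hp with h | h
      · simp [h]
      · exact ih p h
    · rw [if_neg (by simp [hc])] at hp
      cases hs : List.splitOnP (· == ',') rest with
      | nil => exact absurd hs (List.splitOnP_ne_nil _ _)
      | cons hd tl =>
        rw [hs] at hp
        simp only [List.modifyHead] at hp
        rcases List.mem_cons.mp hp with h | h
        · subst h
          intro hmem
          rcases List.mem_cons.mp hmem with h' | h'
          · exact hc h'.symm
          · exact ih hd (by rw [hs]; exact List.mem_cons_self) h'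
        · exact ih p (by rw [hs]; exact List.mem_cons_of_mem _ h)

lemma joinC_splitOnP (s : List Char) : joinC (List.splitOnP (· == ',') s) = s := by
  induction s with
  | nil => simp [joinC]
  | cons c rest ih =>
    rw [List.splitOnP_cons]
    by_cases hc : c = ','
    · rw [if_pos (by simp [hc])]
      cases hs : List.splitOnP (· == ',') rest with
      | nil => exact absurd hs (List.splitOnP_ne_nil _ _)
      | cons hd tl =>
        rw [hs] at ih
        simp [joinC, ih, hc]
    · rw [if_neg (by simp [hc])]
      cases hs : List.splitOnP (· == ',') rest with
      | nil => exact absurd hs (List.splitOnP_ne_nil _ _)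
      | cons hd tl =>
        rw [hs] at ih
        cases tl with
        | nil => simpa [joinC] using ih
        | cons q P => simp only [List.modifyHead, joinC] at ih ⊢; simp [ih]

-- split1 skips over characters that cannot start an occurrence of a needle beginning with ','
lemma split1_skip (sep' : List Char) : ∀ (u l : List Char), (∀ c ∈ u, c ≠ ',') →
    split1 (',' :: sep') (u ++ l) = (split1 (',' :: sep') l).map (fun pr => (u ++ pr.1, pr.2)) := by
  intro u
  induction u with
  | nil =>
    intro l _
    simp only [List.nil_append]
    cases hs : split1 (',' :: sep') l with
    | none => simp [hs]
    | some pr => simp [hs]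
  | cons c u' ih =>
    intro l hu
    have hc : c ≠ ',' := hu c List.mem_cons_self
    rw [List.cons_append, split1]
    rw [if_neg (by simp [List.isPrefixOf_iff_prefix, List.cons_prefix_cons]; intro h; exact absurd h.symm hc)]
    rw [ih l (fun d hd => hu d (List.mem_cons_of_mem _ hd))]
    cases hs : split1 (',' :: sep') l with
    | none => simp
    | some pr => cases pr; simp

lemma split1_nil_of_ne (sep : List Char) (h : sep ≠ []) : split1 sep [] = none := by
  rw [split1, if_neg (by simp [List.isPrefixOf_iff_prefix, h])]

lemma split1_cons_comma (sep' l : List Char) :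
    split1 (',' :: sep') (',' :: l) =
      if sep'.isPrefixOf l then some ([], l.drop sep'.length)
      else (split1 (',' :: sep') l).map (fun pr => (',' :: pr.1, pr.2)) := by
  rw [split1]
  by_cases hp : sep'.isPrefixOf l
  · rw [if_pos (by simp [List.isPrefixOf_iff_prefix] at hp ⊢; exact hp), if_pos hp]
    simp
  · rw [if_neg (by simp [List.isPrefixOf_iff_prefix] at hp ⊢; exact hp), if_neg hp]

-- for a name t with no '=' and no ',', within fields that are comma-free:
lemma prefix_name_iff (t : List Char) (ht : '=' ∉ t) (htc : ',' ∉ t) :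
    ∀ (p : List Char) (rest : List Char), ',' ∉ p → (rest = [] ∨ ∃ r, rest = ',' :: r) →
    ((t ++ ['=']).isPrefixOf (p ++ rest) = true ↔ ∃ v, p = t ++ '=' :: v) := by
  induction t with
  | nil =>
    intro p rest hp hrest
    cases p with
    | nil =>
      simp only [List.nil_append]
      constructor
      · intro h
        rcases hrest with h0 | ⟨r, h0⟩ <;> subst h0 <;> simp [List.isPrefixOf_iff_prefix, List.cons_prefix_cons] at h
      · rintro ⟨v, hv⟩; exact absurd hv (by simp)
    | cons c p' =>
      simp only [List.cons_append, List.nil_append]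
      by_cases hc : c = '='
      · subst hc
        constructor
        · intro _; exact ⟨p', rfl⟩
        · intro _; simp [List.isPrefixOf_iff_prefix, List.cons_prefix_cons]
      · constructor
        · intro h; exfalso
          simp [List.isPrefixOf_iff_prefix, List.cons_prefix_cons] at h
          exact hc h.symm
        · rintro ⟨v, hv⟩; rw [List.cons_eq_cons] at hv; exact absurd hv.1 hc
  | cons a t' ih =>
    intro p rest hp hrest
    have ha : a ≠ ',' := fun h => htc (h ▸ List.mem_cons_self)
    cases p with
    | nil =>
      simp only [List.nil_append]
      constructor
      · intro h; exfalso
        rcases hrest with h0 | ⟨r, h0⟩ <;> subst h0 <;>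
          simp [List.isPrefixOf_iff_prefix, List.cons_prefix_cons] at h
        exact ha h.1
      · rintro ⟨v, hv⟩; exact absurd hv (by simp)
    | cons c p' =>
      have ht' : '=' ∉ t' := fun h => ht (List.mem_cons_of_mem _ h)
      have htc' : ',' ∉ t' := fun h => htc (List.mem_cons_of_mem _ h)
      have hp' : ',' ∉ p' := fun h => hp (List.mem_cons_of_mem _ h)
      constructor
      · intro h
        simp only [List.cons_append, List.isPrefixOf_iff_prefix, List.cons_prefix_cons] at h
        obtain ⟨hac, hpre⟩ := h
        have := (ih ht' htc' p' rest hp' hrest).mp (by simpa [List.isPrefixOf_iff_prefix] using hpre)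
        obtain ⟨v, hv⟩ := this
        exact ⟨v, by rw [hac, hv]; rfl⟩
      · rintro ⟨v, hv⟩
        simp only [List.cons_append] at hv
        rw [List.cons_eq_cons] at hv
        obtain ⟨hca, hpv⟩ := hv
        simp only [List.cons_append, List.isPrefixOf_iff_prefix, List.cons_prefix_cons]
        refine ⟨hca.symm, ?_⟩
        have := (ih ht' htc' p' rest hp' hrest).mpr ⟨v, hpv⟩
        simpa [List.isPrefixOf_iff_prefix] using this

-- splitting a pair p = t ++ '=' :: v at its first '=' (t has no '=')
lemma split1_eq_pair (t : List Char) (ht : '=' ∉ t) (v : List Char) :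
    split1 ['='] (t ++ '=' :: v) = some (t, v) := by
  induction t with
  | nil => rw [List.nil_append, split1, if_pos (by simp [List.isPrefixOf_iff_prefix])]; rfl
  | cons a t' ih =>
    have ha : a ≠ '=' := fun h => ht (h ▸ List.mem_cons_self)
    rw [List.cons_append, split1,
      if_neg (by simp [List.isPrefixOf_iff_prefix, List.cons_prefix_cons]; intro h; exact absurd h.symm ha),
      ih (fun h => ht (List.mem_cons_of_mem _ h))]
    rfl

-- decomposition of any p containing '=' at its first '='
lemma exists_first_eq (p : List Char) (h : '=' ∈ p) :
    ∃ n v, p = n ++ '=' :: v ∧ '=' ∉ n := by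
  induction p with
  | nil => simp at h
  | cons c p' ih =>
    by_cases hc : c = '='
    · exact ⟨[], p', by simp [hc], by simp⟩
    · have : '=' ∈ p' := by rcases List.mem_cons.mp h with h' | h'; exact absurd h'.symm hc; exact h'
      obtain ⟨n, v, hnv, hn⟩ := ih this
      exact ⟨c :: n, v, by simp [hnv], by simp [hn]; exact fun hh => absurd hh.symm hc⟩

lemma singleton_infix_iff (c : Char) (l : List Char) : [c] <:+: l ↔ c ∈ l := by
  constructor
  · intro h; exact h.mem List.mem_cons_self
  · intro h
    obtain ⟨s, t, hst⟩ := List.append_of_mem h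
    exact ⟨s, t, by rw [hst]; simp⟩

lemma isIn_singleton (c : Char) (l : List Char) : PySem.Chars.isIn [c] l = true ↔ c ∈ l := by
  rw [PySem.Chars.isIn_iff_infix, singleton_infix_iff]

-- first comma-field of a, via split1
lemma split1_comma_takeWhile (a : List Char) :
    (match split1 [','] a with | none => a | some pr => pr.1) = a.takeWhile (· ≠ ',') := by
  induction a with
  | nil => rw [split1_nil_of_ne _ (by simp)]; rfl
  | cons c a' ih =>
    by_cases hc : c = ','
    · subst hc
      rw [split1, if_pos (by simp [List.isPrefixOf_iff_prefix])]
      simp [List.takeWhile_cons]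
    · rw [split1, if_neg (by simp [List.isPrefixOf_iff_prefix, List.cons_prefix_cons]; intro hh; exact absurd hh.symm hc)]
      cases hs : split1 [','] a' with
      | none =>
        rw [hs] at ih
        simp only [Option.map_none]
        simp [List.takeWhile_cons, hc]
        simpa using ih
      | some pr =>
        rw [hs] at ih
        simp only [Option.map_some]
        simp [List.takeWhile_cons, hc]
        simpa using ih

lemma takeWhile_comma_free (v rest : List Char) (hv : ',' ∉ v) (hrest : rest = [] ∨ ∃ r, rest = ',' :: r) :
    (v ++ rest).takeWhile (· ≠ ',') = v := by
  induction v with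
  | nil =>
    rcases hrest with h | ⟨r, h⟩ <;> subst h <;> simp [List.takeWhile_cons]
  | cons c v' ih =>
    have hc : c ≠ ',' := fun h => hv (h ▸ List.mem_cons_self)
    rw [List.cons_append, List.takeWhile_cons, if_pos (by simp [hc])]
    rw [ih (fun h => hv (List.mem_cons_of_mem _ h))]

lemma splitOnMax_eq_pair (p t v : List Char) (ht : '=' ∉ t) (hp : p = t ++ '=' :: v) :
    PySem.Chars.splitOnMax p ['='] 1 = [t, v] := by
  rw [splitOnMax_one _ _ (by simp), hp, split1_eq_pair t ht v]

lemma loopA_step_skip (p : List Char) (Q : List (List Char)) (t : List Char)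
    (h : ¬ ∃ v, p = t ++ '=' :: v) : pvLoopA (p :: Q) t = pvLoopA Q t := by
  by_cases he : '=' ∈ p
  · obtain ⟨n, v0, hnv, hn⟩ := exists_first_eq p he
    rw [pvLoopA]
    rw [if_pos ((isIn_singleton _ _).mpr he)]
    simp only
    rw [splitOnMax_eq_pair p n v0 hn hnv]
    rw [if_neg (by intro hnt; simp at hnt; exact h ⟨v0, by rw [hnv, hnt]⟩)]
  · rw [pvLoopA]
    rw [if_neg (fun hb => he ((isIn_singleton _ _).mp hb))]

lemma loopA_eq_search (t : List Char) (ht : '=' ∉ t) (htc : ',' ∉ t) :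
    ∀ P, (∀ p ∈ P, ',' ∉ p) →
    pvLoopA P t = (split1 (',' :: (t ++ ['='])) (',' :: joinC P)).map
      (fun pr => pr.2.takeWhile (· ≠ ',')) := by
  intro P
  induction P with
  | nil =>
    intro _
    rw [show joinC [] = [] from rfl, split1_cons_comma,
      if_neg (by simp [List.isPrefixOf_iff_prefix]),
      split1_nil_of_ne _ (by simp)]
    rfl
  | cons p P' ih =>
    intro hP
    have hpc : ',' ∉ p := hP p List.mem_cons_self
    obtain ⟨X, hXdef, hXcase⟩ :
        ∃ X, joinC (p :: P') = p ++ X ∧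
          ((P' = [] ∧ X = []) ∨ (∃ q P'', P' = q :: P'' ∧ X = ',' :: joinC (q :: P''))) := by
      cases P' with
      | nil => exact ⟨[], by simp [joinC], Or.inl ⟨rfl, rfl⟩⟩
      | cons q P'' => exact ⟨',' :: joinC (q :: P''), rfl, Or.inr ⟨q, P'', rfl, rfl⟩⟩
    have hXshape : X = [] ∨ ∃ r, X = ',' :: r := by
      rcases hXcase with ⟨_, h⟩ | ⟨q, P'', _, h⟩
      · exact Or.inl h
      · exact Or.inr ⟨_, h⟩
    rw [hXdef, split1_cons_comma]
    by_cases hm : ∃ v, p = t ++ '=' :: v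
    · obtain ⟨v, hv⟩ := hm
      have hvc : ',' ∉ v := fun hc => hpc (by rw [hv]; exact List.mem_append_right _ (List.mem_cons_of_mem _ hc))
      rw [if_pos ((prefix_name_iff t ht htc p X hpc hXshape).mpr ⟨v, hv⟩)]
      have hdrop : (p ++ X).drop (t ++ ['=']).length = v ++ X := by
        rw [hv, show (t ++ '=' :: v) ++ X = (t ++ ['=']) ++ (v ++ X) by simp]
        exact List.drop_left
      rw [hdrop]
      have he : '=' ∈ p := by rw [hv]; exact List.mem_append_right _ List.mem_cons_self
      rw [pvLoopA, if_pos ((isIn_singleton _ _).mpr he)]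
      simp only
      rw [splitOnMax_eq_pair p t v ht hv, if_pos (show [t, v].getD 0 [] = t by rfl)]
      simp only [Option.map_some]
      rw [takeWhile_comma_free v X hvc hXshape]
      rfl
    · rw [if_neg (fun hp => hm ((prefix_name_iff t ht htc p X hpc hXshape).mp hp))]
      rw [split1_skip _ p X (fun c hc => fun hceq => hpc (hceq ▸ hc))]
      rw [loopA_step_skip p P' t hm]
      rcases hXcase with ⟨hP0, hX0⟩ | ⟨q, P'', hPq, hXq⟩
      · subst hP0; subst hX0
        rw [split1_nil_of_ne _ (by simp)]
        rfl
      · subst hPq; subst hXq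
        rw [ih (fun r hr => hP r (List.mem_cons_of_mem _ hr))]
        cases hs : split1 (',' :: (t ++ ['='])) (',' :: joinC (q :: P'')) with
        | none => simp
        | some pr => simp

lemma loopA_sep_none (t : List Char) (hsep : '=' ∈ t ∨ ',' ∈ t) :
    ∀ P, (∀ p ∈ P, ',' ∉ p) → pvLoopA P t = none := by
  intro P
  induction P with
  | nil => intro _; rfl
  | cons p P' ih =>
    intro hP
    have hpc : ',' ∉ p := hP p List.mem_cons_self
    have ihr := ih (fun r hr => hP r (List.mem_cons_of_mem _ hr))
    by_cases he : '=' ∈ p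
    · obtain ⟨n, v0, hnv, hn⟩ := exists_first_eq p he
      rw [pvLoopA, if_pos ((isIn_singleton _ _).mpr he)]
      simp only
      rw [splitOnMax_eq_pair p n v0 hn hnv]
      rw [if_neg ?_, ihr]
      intro hnt
      have hnt' : n = t := by simpa using hnt
      rcases hsep with h | h
      · exact hn (hnt' ▸ h)
      · exact hpc (by rw [hnv]; exact List.mem_append_left _ (hnt' ▸ h))
    · rw [pvLoopA, if_neg (fun hb => he ((isIn_singleton _ _).mp hb)), ihr]

lemma str_isIn_singleton (c : Char) (sub : String) (s : String) (h : sub.toList = [c]) :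
    PySem.Str.isIn sub s = true ↔ c ∈ s.toList := by
  rw [PySem.Str.isIn_iff_infix, h, singleton_infix_iff]

-- ===== VERDICT (by name: the statement is the Claim_ definition above) =====
theorem extract_tag_py_spec : Claim_equal_extract_tag_py := by
  intro key tag_name _
  unfold Spec_extract_tag_py extract_tag_py extract_tag_py_alt
  by_cases hbrace : PySem.Str.isIn "{" key
  case neg => rw [if_neg hbrace, if_neg hbrace]
  rw [if_pos hbrace, if_pos hbrace]
  simp only
  have hP : ∀ p ∈ PySem.Chars.splitOn (pvRstripBrace ((PySem.Chars.splitOnMax key.toList ['{'] 1).getD 1 [])) [','], ',' ∉ p := by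
    rw [splitOn_comma]; exact splitOnP_noComma _
  by_cases hguard : (PySem.Str.isIn "=" tag_name || PySem.Str.isIn "," tag_name) = true
  · rw [if_pos hguard]
    have hsep : '=' ∈ tag_name.toList ∨ ',' ∈ tag_name.toList := by
      rcases Bool.or_eq_true_iff.mp hguard with h | h
      · exact Or.inl ((str_isIn_singleton '=' "=" tag_name rfl).mp h)
      · exact Or.inr ((str_isIn_singleton ',' "," tag_name rfl).mp h)
    rw [loopA_sep_none tag_name.toList hsep _ hP]
    rfl
  · rw [if_neg hguard]
    have hor : PySem.Str.isIn "=" tag_name = false ∧ PySem.Str.isIn "," tag_name = false := by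
      rw [← Bool.or_eq_false_iff]
      exact Bool.not_eq_true _ ▸ eq_false_of_ne_true hguard
    have ht : '=' ∉ tag_name.toList := fun h =>
      by have := (str_isIn_singleton '=' "=" tag_name rfl).mpr h; rw [hor.1] at this; exact Bool.false_ne_true this
    have htc : ',' ∉ tag_name.toList := fun h =>
      by have := (str_isIn_singleton ',' "," tag_name rfl).mpr h; rw [hor.2] at this; exact Bool.false_ne_true this
    rw [show PySem.Chars.splitOn (pvRstripBrace ((PySem.Chars.splitOnMax key.toList ['{'] 1).getD 1 [])) [','] = List.splitOnP (· == ',') (pvRstripBrace ((PySem.Chars.splitOnMax key.toList ['{'] 1).getD 1 [])) from splitOn_comma _]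
    rw [loopA_eq_search tag_name.toList ht htc _ (splitOnP_noComma _)]
    rw [joinC_splitOnP]
    rw [splitOnMax_one (',' :: tag_name.toList ++ ['=']) (',' :: pvRstripBrace ((PySem.Chars.splitOnMax key.toList ['{'] 1).getD 1 [])) (by simp)]
    cases hsp : split1 (',' :: (tag_name.toList ++ ['='])) (',' :: pvRstripBrace ((PySem.Chars.splitOnMax key.toList ['{'] 1).getD 1 [])) with
    | none =>
      simp only [List.cons_append] at hsp ⊢
      rw [hsp]
      rfl
    | some pr =>
      obtain ⟨b, a⟩ := pr
      simp only [List.cons_append] at hsp ⊢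
      rw [hsp]
      simp only [Option.map_some]
      rw [if_neg (by simp)]
      rw [show ([b, a] : List (List Char)).getD 1 [] = a from rfl]
      rw [splitOnMax_one [','] a (by simp)]
      have := split1_comma_takeWhile a
      cases hsa : split1 [','] a with
      | none => rw [hsa] at this; simp only [List.getD]; rw [← this]; rfl
      | some pr2 => rw [hsa] at this; simp only [List.getD]; rw [← this]; rfl
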